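-- pv_equiv track=rewrite | github.com/pypi-data/pypi-mirror-397 | packages/supertape/supertape-1.0.0.dev11.tar.gz/supertape-1.0.0.dev11/src/supertape/core/log/dump.py | dump_ascii_only
-- ===== SOURCE A (Python) =====
-- import string
--
-- PRINTABLE = [c for c in string.printable if ord(c) >= 0x20]
--
-- def dump_ascii_only(bytes: list[int], width: int = 16) -> list[str]:
--     lines = []
--     offset = 0
--
--     while offset < len(bytes):
--         row_asc = ""
--
--         for o in range(0, width):
--             v = bytes[offset + o] if offset + o < len(bytes) else None
--
--             if v is not None:
--                 c = chr(v)
--                 row_asc += c if c in PRINTABLE else "."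
--
--         lines.append(row_asc)
--
--         offset += width
--
--     return lines
-- ===== SOURCE B (Python) =====
-- def dump_ascii_only(bytes: list[int], width: int = 16) -> list[str]:
--     rendered = "".join(chr(v) if 0x20 <= v <= 0x7E else "." for v in bytes)
--     return [rendered[i:i + width] for i in range(0, len(rendered), width)]
-- ===== Notes on version B (the rewrite author's own statement) =====
-- stated objective: simpler
-- what changed: Replaces A's while loop carrying an offset with a None-sentinel nested index loop by two cleanly separated passes: one join/map rendering every byte, then slice-based chunking over range(0, len, width).
-- outside the precondition, e.g. on dump_ascii_only([], 0): A returns [], B raises ValueError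
import Mathlib
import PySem

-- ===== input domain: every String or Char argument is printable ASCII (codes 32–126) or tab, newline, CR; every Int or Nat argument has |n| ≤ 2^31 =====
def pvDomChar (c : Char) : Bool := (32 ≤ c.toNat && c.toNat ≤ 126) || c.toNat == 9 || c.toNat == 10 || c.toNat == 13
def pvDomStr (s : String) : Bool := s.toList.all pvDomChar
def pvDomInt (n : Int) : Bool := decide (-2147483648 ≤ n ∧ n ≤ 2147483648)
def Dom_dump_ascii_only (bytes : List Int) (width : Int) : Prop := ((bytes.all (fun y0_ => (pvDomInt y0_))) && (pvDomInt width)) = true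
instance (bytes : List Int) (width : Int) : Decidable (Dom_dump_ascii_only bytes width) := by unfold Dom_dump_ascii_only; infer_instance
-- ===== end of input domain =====

-- B renders all bytes in one map pass and then chunks the rendered text by slicing, instead of
-- A's while loop with a None-sentinel nested index loop; objective: simpler (same O(n) cost).

-- ===== PORT A =====
-- string.printable (module-level constant from the import)
def pvStringPrintable : List Char :=
  ['0', '1', '2', '3', '4', '5', '6', '7', '8', '9', 'a', 'b', 'c', 'd', 'e', 'f', 'g', 'h', 'i', 'j', 'k', 'l', 'm', 'n', 'o', 'p', 'q', 'r', 's', 't', 'u', 'v', 'w', 'x', 'y', 'z', 'A', 'B', 'C', 'D', 'E', 'F', 'G', 'H', 'I', 'J', 'K', 'L', 'M', 'N', 'O', 'P', 'Q', 'R', 'S', 'T', 'U', 'V', 'W', 'X', 'Y', 'Z', '!', '"', '#', '$', '%', '&', '\'', '(', ')', '*', '+', ',', '-', '.', '/', ':', ';', '<', '=', '>', '?', '@', '[', '\\', ']', '^', '_', '`', '{', '|', '}', '~', ' ', '\x09', '\x0a', '\x0d', '\x0b', '\x0c']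

-- PRINTABLE = [c for c in string.printable if ord(c) >= 0x20]
def pvPRINTABLE : List Char := pvStringPrintable.filter (fun c => 32 ≤ c.toNat)

-- the inner 'for o in range(0, width)' loop building row_asc (rows kept as List Char; the
-- Python str append row_asc += c is the list append; chr(v) is Char.ofNat v.toNat, exact for
-- 0 ≤ v ≤ 0x10FFFF — Python raises ValueError outside that range, which Pre_ excludes)
def pvRowA (bytes : List Int) (width : Int) (offset : Int) : List Char :=
  (PySem.List.pyRange 0 width 1).foldl
    (fun acc o =>
      match (if offset + o < (bytes.length : Int) then PySem.List.pyGet? bytes (offset + o) else none) with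
      | some v =>
          let c := Char.ofNat v.toNat
          acc ++ [if pvPRINTABLE.contains c then c else '.']
      | none => acc)
    []

-- the outer while loop; the added '0 < width' guard only makes the recursion total:
-- for width ≤ 0 (and nonempty bytes) the Python loops forever, which Pre_ excludes
def pvLoopA (bytes : List Int) (width : Int) (offset : Nat) (lines : List String) : List String :=
  if h : offset < bytes.length ∧ 0 < width then
    pvLoopA bytes width (offset + width.toNat) (lines ++ [String.ofList (pvRowA bytes width (offset : Int))])
  else lines
termination_by bytes.length - offset
decreasing_by omega

def dump_ascii_only (bytes : List Int) (width : Int) : List String :=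
  pvLoopA bytes width 0 []

-- ===== PORT B =====
def dump_ascii_only_alt (bytes : List Int) (width : Int) : List String :=
  let rendered : List Char :=
    bytes.map (fun v => if 32 ≤ v ∧ v ≤ 126 then Char.ofNat v.toNat else '.')
  -- range(0, len, 0) raises ValueError in Python (outside Pre_); guard only makes the port total
  if width = 0 then []
  else
    (PySem.List.pyRange 0 (rendered.length : Int) width).map
      (fun i => String.ofList (PySem.List.slice rendered (some i) (some (i + width))))

-- ===== PRECONDITION & SPEC =====
-- Pre_ excludes width ≤ 0 (there A loops forever on nonempty bytes, and on empty bytes B's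
-- range-based chunking raises ValueError for width = 0) and byte values that are negative or
-- exceed 0x10FFFF (there A's chr raises ValueError, while B renders them as '.').
def Pre_dump_ascii_only (bytes : List Int) (width : Int) : Prop :=
  1 ≤ width ∧ ∀ v ∈ bytes, 0 ≤ v ∧ v ≤ 1114111

instance (bytes : List Int) (width : Int) : Decidable (Pre_dump_ascii_only bytes width) := by
  unfold Pre_dump_ascii_only; infer_instance

def pvWitness_dump_ascii_only : List Int × Int := ([72, 105, 7, 200, 40], 2)

def Spec_dump_ascii_only (bytes : List Int) (width : Int) (out : List String) : Prop :=
  out = dump_ascii_only_alt bytes width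

instance (bytes : List Int) (width : Int) (out : List String) : Decidable (Spec_dump_ascii_only bytes width out) := by
  unfold Spec_dump_ascii_only; infer_instance

-- ===== CLAIM (what is proved, stated in full; the proofs are below) =====
def Claim_equal_dump_ascii_only : Prop := ∀ (bytes : List Int) (width : Int), Dom_dump_ascii_only bytes width → Pre_dump_ascii_only bytes width → Spec_dump_ascii_only bytes width (dump_ascii_only bytes width)

-- ===== LEMMAS AND PROOFS =====

-- A's per-byte rendering and B's per-byte rendering, as named functions
def pvGA (v : Int) : Char :=
  if pvPRINTABLE.contains (Char.ofNat v.toNat) then Char.ofNat v.toNat else '.'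

def pvGB (v : Int) : Char := if 32 ≤ v ∧ v ≤ 126 then Char.ofNat v.toNat else '.'

-- chunking a char list into pieces of size w
def pvChunk (w : Nat) (l : List Char) : List (List Char) :=
  if h : l = [] ∨ w = 0 then [] else l.take w :: pvChunk w (l.drop w)
termination_by l.length
decreasing_by
  rcases l with _ | ⟨x, xs⟩ <;> simp_all <;> omega

theorem pvChunk_nil (w : Nat) : pvChunk w [] = [] := by
  rw [pvChunk]; simp

theorem pvChunk_cons (w : Nat) (l : List Char) (hl : l ≠ []) (hw : 0 < w) :
    pvChunk w l = l.take w :: pvChunk w (l.drop w) := by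
  rw [pvChunk]; simp [hl, Nat.pos_iff_ne_zero.mp hw]

set_option maxRecDepth 20000 in
theorem printable_mem (n : Nat) (h1 : 32 ≤ n) (h2 : n ≤ 126) :
    pvPRINTABLE.contains (Char.ofNat n) = true := by
  interval_cases n <;> decide

set_option maxRecDepth 20000 in
theorem printable_bound_all :
    pvPRINTABLE.all (fun c => decide (32 ≤ c.toNat ∧ c.toNat ≤ 126)) = true := by decide

theorem printable_bound : ∀ c ∈ pvPRINTABLE, 32 ≤ c.toNat ∧ c.toNat ≤ 126 := by
  intro c hc
  have := List.all_eq_true.mp printable_bound_all c hc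
  simpa using this

theorem pv_char_agree (v : Int) (h0 : 0 ≤ v) (h1 : v ≤ 1114111) : pvGA v = pvGB v := by
  unfold pvGA pvGB
  by_cases h : 32 ≤ v ∧ v ≤ 126
  · rw [printable_mem v.toNat (by omega) (by omega), if_pos h]
    simp
  · rw [if_neg h]
    cases hc : pvPRINTABLE.contains (Char.ofNat v.toNat)
    · simp
    · exfalso
      have hmem : Char.ofNat v.toNat ∈ pvPRINTABLE := by
        rwa [← List.contains_iff_mem]
      have hb := printable_bound _ hmem
      rw [Char.toNat_ofNat] at hb
      split at hb <;> omega

theorem pyGet?_natCast' (xs : List Int) (k : Nat) : PySem.List.pyGet? xs (k : Int) = xs[k]? := by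
  simp [PySem.List.pyGet?, PySem.List.pyIdx?]
  split <;> simp_all

theorem pv_row_aux (bytes : List Int) (offset : Nat) (w : Nat) (acc : List Char) :
    (PySem.List.pyRange 0 (w : Int) 1).foldl
      (fun acc o =>
        match (if (offset : Int) + o < (bytes.length : Int) then PySem.List.pyGet? bytes ((offset : Int) + o) else none) with
        | some v =>
            let c := Char.ofNat v.toNat
            acc ++ [if pvPRINTABLE.contains c then c else '.']
        | none => acc)
      acc
    = acc ++ ((bytes.drop offset).take w).map pvGA := by
  induction w generalizing acc with
  | zero => simp [PySem.List.pyRange_one_eq_nil (by omega : (0:Int) ≤ 0)]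
  | succ w ih =>
    have hcast : ((w + 1 : Nat) : Int) = (w : Int) + 1 := by push_cast; ring
    rw [hcast, PySem.List.pyRange_one_succ_right (by positivity), List.foldl_append]
    rw [ih]
    have hoff : (offset : Int) + (w : Int) = ((offset + w : Nat) : Int) := by push_cast; ring
    by_cases h : offset + w < bytes.length
    · have hlt : (offset : Int) + (w : Int) < (bytes.length : Int) := by push_cast; omega
      simp only [List.foldl_cons, List.foldl_nil]
      have hg : bytes[offset + w]? = some bytes[offset + w] := List.getElem?_eq_getElem (by omega)
      have htake : (bytes.drop offset).take (w + 1) = (bytes.drop offset).take w ++ [bytes[offset + w]] := by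
        rw [List.take_add_one]
        have : (bytes.drop offset)[w]? = some bytes[offset + w] := by
          rw [List.getElem?_drop]
          exact List.getElem?_eq_getElem (by omega)
        simp [this]
      rw [htake, if_pos hlt, hoff, pyGet?_natCast', hg]
      simp only [List.map_append, List.map_cons, List.map_nil, pvGA, List.append_assoc]
    · have hge : ¬ ((offset : Int) + (w : Int) < (bytes.length : Int)) := by push_cast; omega
      simp only [List.foldl_cons, List.foldl_nil]
      rw [if_neg hge]
      have hlen : (bytes.drop offset).length ≤ w := by
        simp only [List.length_drop]; omega
      rw [List.take_of_length_le (Nat.le_succ_of_le hlen), List.take_of_length_le hlen]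

theorem pv_row_eq (bytes : List Int) (w : Nat) (offset : Nat) :
    pvRowA bytes (w : Int) (offset : Int) = ((bytes.drop offset).take w).map pvGA := by
  have := pv_row_aux bytes offset w []
  simpa [pvRowA] using this

theorem pv_loopA_eq (bytes : List Int) (w : Nat) (hw : 0 < w) (offset : Nat) (lines : List String) :
    pvLoopA bytes (w : Int) offset lines
      = lines ++ (pvChunk w ((bytes.map pvGA).drop offset)).map String.ofList := by
  generalize hm : bytes.length - offset = m
  induction m using Nat.strong_induction_on generalizing offset lines with
  | _ m ih =>
  rw [pvLoopA]
  by_cases h : offset < bytes.length ∧ 0 < (w : Int)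
  · rw [dif_pos h]
    have hwt : (w : Int).toNat = w := Int.toNat_natCast w
    rw [hwt]
    rw [ih (bytes.length - (offset + w)) (by omega) (offset + w) _ rfl]
    have hne : (bytes.map pvGA).drop offset ≠ [] := by
      simp only [ne_eq, List.drop_eq_nil_iff, List.length_map]
      omega
    rw [pvChunk_cons w _ hne hw]
    rw [pv_row_eq bytes w offset]
    simp only [List.map_cons, List.map_take, List.map_drop, List.drop_drop, List.append_assoc,
      List.cons_append, List.nil_append]
  · rw [dif_neg h]
    have hoff : ¬ offset < bytes.length := by
      intro hc; exact h ⟨hc, by exact_mod_cast hw⟩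
    have hnil : (bytes.map pvGA).drop offset = [] := by
      simp only [List.drop_eq_nil_iff, List.length_map]; omega
    rw [hnil, pvChunk_nil]
    simp

theorem pyRange_pos_cons (a b s : Int) (hs : 0 < s) (hab : a < b) :
    PySem.List.pyRange a b s = a :: PySem.List.pyRange (a + s) b s := by
  rw [PySem.List.pyRange_of_pos _ _ hs, PySem.List.pyRange_of_pos _ _ hs]
  by_cases hb : a + s < b
  · have hq : (b - a + s - 1) / s = (b - (a + s) + s - 1) / s + 1 := by
      have h1 : b - a + s - 1 = (b - (a + s) + s - 1) + 1 * s := by ring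
      rw [h1, Int.add_mul_ediv_right _ _ (by omega : s ≠ 0)]
    have hnn : 0 ≤ (b - (a + s) + s - 1) / s := Int.ediv_nonneg (by omega) (by omega)
    rw [if_pos hab, if_pos hb, hq]
    have : ((b - (a + s) + s - 1) / s + 1).toNat = ((b - (a + s) + s - 1) / s).toNat + 1 := by omega
    rw [this, List.range_succ_eq_map]
    simp only [List.map_cons, List.map_map]
    congr 1
    · simp
    · apply List.map_congr_left
      intro k _
      simp only [Function.comp_apply, Nat.succ_eq_add_one]
      push_cast
      ring
  · have h1 : 1 ≤ (b - a + s - 1) / s := by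
      rw [Int.le_ediv_iff_mul_le hs]; omega
    have h2 : (b - a + s - 1) / s < 2 := by
      rw [Int.ediv_lt_iff_lt_mul hs]; omega
    have hq : ((b - a + s - 1) / s).toNat = 1 := by omega
    rw [if_pos hab, if_neg hb, hq]
    simp

theorem pyRange_pos_nil (a b s : Int) (hs : 0 < s) (hab : ¬ a < b) :
    PySem.List.pyRange a b s = [] := by
  rw [PySem.List.pyRange_of_pos _ _ hs, if_neg hab]
  simp

theorem pv_mapB_eq (l : List Char) (w : Nat) (hw : 0 < w) (a : Nat) :
    (PySem.List.pyRange (a : Int) (l.length : Int) (w : Int)).map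
        (fun i => String.ofList (PySem.List.slice l (some i) (some (i + (w : Int)))))
      = (pvChunk w (l.drop a)).map String.ofList := by
  generalize hm : l.length - a = m
  induction m using Nat.strong_induction_on generalizing a with
  | _ m ih =>
  have hws : (0 : Int) < (w : Int) := by exact_mod_cast hw
  by_cases h : a < l.length
  · have hab : (a : Int) < (l.length : Int) := by exact_mod_cast h
    rw [pyRange_pos_cons _ _ _ hws hab]
    have hcast : (a : Int) + (w : Int) = ((a + w : Nat) : Int) := by push_cast; ring
    rw [List.map_cons, hcast, ih (l.length - (a + w)) (by omega) (a + w) rfl]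
    have hne : l.drop a ≠ [] := by
      simp only [ne_eq, List.drop_eq_nil_iff]; omega
    rw [pvChunk_cons w _ hne hw, List.map_cons]
    congr 1
    · rw [← hcast, PySem.List.slice_natCast_add]
    · rw [List.drop_drop]
  · have hab : ¬ (a : Int) < (l.length : Int) := by exact_mod_cast h
    rw [pyRange_pos_nil _ _ _ hws hab]
    have hnil : l.drop a = [] := by
      simp only [List.drop_eq_nil_iff]; omega
    rw [hnil, pvChunk_nil]
    simp

-- ===== VERDICT (by name: the statement is the Claim_ definition above) =====
theorem dump_ascii_only_spec : Claim_equal_dump_ascii_only := by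
  intro bytes width _ hpre
  obtain ⟨hw, hall⟩ := hpre
  unfold Spec_dump_ascii_only dump_ascii_only dump_ascii_only_alt
  have hwe : width = ((width.toNat : Nat) : Int) := (Int.toNat_of_nonneg (by omega)).symm
  have hwpos : 0 < width.toNat := by omega
  rw [hwe]
  rw [pv_loopA_eq bytes width.toNat hwpos 0 []]
  have hren : bytes.map (fun v => if 32 ≤ v ∧ v ≤ 126 then Char.ofNat v.toNat else '.')
      = bytes.map pvGA := by
    apply List.map_congr_left
    intro v hv
    rcases hall v hv with ⟨h0, h1⟩
    exact ((pv_char_agree v h0 h1).trans (by rfl)).symm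
  simp only [hren]
  rw [if_neg (by omega : ¬ ((width.toNat : Nat) : Int) = 0)]
  have := pv_mapB_eq (bytes.map pvGA) width.toNat hwpos 0
  simp only [Nat.cast_zero, List.drop_zero] at this
  rw [this]
  simp
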